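-- pv_equiv track=rewrite | github.com/pierrealexandreguillemin-a11y/pocket_arbiter | scripts/pipeline/export_sdk.py | _prepare_fts_query
-- ===== SOURCE A (Python) =====
-- def _prepare_fts_query(query: str) -> str:
--     """
--     Prepare une requete pour FTS5.
--
--     Convertit "mot1 mot2 mot3" en "mot1 OR mot2 OR mot3" pour meilleur recall.
--     Retire les caracteres speciaux FTS5 qui pourraient causer des erreurs.
--
--     Args:
--         query: Requete texte brute.
--
--     Returns:
--         Requete formatee pour FTS5 MATCH.
--     """
--     # Remove FTS5 special characters and punctuation
--     special_chars = [
--         '"',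
--         "'",
--         "(",
--         ")",
--         "*",
--         "-",
--         "+",
--         ":",
--         "^",
--         "~",
--         "@",
--         "?",
--         "!",
--         ",",
--         ".",
--         ";",
--     ]
--     clean_query = query
--     for char in special_chars:
--         clean_query = clean_query.replace(char, " ")
--
--     # Split into words and filter empty
--     words = [w.strip() for w in clean_query.split() if w.strip()]
--
--     if not words:
--         return ""
--
--     # Join with OR for better recall (any word matches)
--     return " OR ".join(words)
-- ===== SOURCE B (Python) =====
-- def _prepare_fts_query(query: str) -> str:
--     """Single-pass tokenizer: delimiters are FTS5 special chars and whitespace."""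
--     special = set('"\'()*-+:^~@?!,.;')
--     words = []
--     buf = []
--     for ch in query:
--         if ch in special or ch.isspace():
--             if buf:
--                 words.append("".join(buf))
--                 buf = []
--         else:
--             buf.append(ch)
--     if buf:
--         words.append("".join(buf))
--     return " OR ".join(words)
-- ===== Notes on version B (the rewrite author's own statement) =====
-- stated objective: alternative
-- what changed: Replaces 16 full replace-passes over the string plus a split/strip/filter pass with a single character-by-character tokenizer that splits on a precomputed set of special characters and whitespace; asymptotically one pass instead of 17, though CPython's C-level str.replace makes A faster in practice.
import Mathlib
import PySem

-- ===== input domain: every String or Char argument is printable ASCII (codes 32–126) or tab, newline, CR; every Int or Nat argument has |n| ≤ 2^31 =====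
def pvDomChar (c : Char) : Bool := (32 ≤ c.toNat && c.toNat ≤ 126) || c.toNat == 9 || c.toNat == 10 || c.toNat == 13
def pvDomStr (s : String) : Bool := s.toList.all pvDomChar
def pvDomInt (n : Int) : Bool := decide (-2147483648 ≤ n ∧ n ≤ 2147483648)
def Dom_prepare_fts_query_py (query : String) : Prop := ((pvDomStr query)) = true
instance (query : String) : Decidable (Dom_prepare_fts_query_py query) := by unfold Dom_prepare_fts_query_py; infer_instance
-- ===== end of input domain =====

-- B: a single-pass tokenizer over the string (delimiters = the 16 FTS5 special chars plus whitespace) instead of A's 16 replace passes followed by split/strip/filter; return values proved equal on all strings.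

-- ===== PORT A =====
-- A's special_chars list, in order
def pvSpecialsA : List Char := ['"', '\'', '(', ')', '*', '-', '+', ':', '^', '~', '@', '?', '!', ',', '.', ';']

def prepare_fts_query_py (query : String) : String :=
  let clean := pvSpecialsA.foldl (fun s c => PySem.Chars.replace s [c] [' ']) query.toList
  let words := (PySem.Chars.split₀ clean).filterMap (fun w =>
      if (PySem.Chars.strip w).isEmpty then none else some (PySem.Chars.strip w))
  if words.isEmpty then "" else String.ofList (PySem.Chars.join " OR ".toList words)

-- ===== PORT B =====
-- B's set('"\'()*-+:^~@?!,.;')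
def pvSpecialsB : PySem.Set Char := PySem.Set.ofList "\"'()*-+:^~@?!,.;".toList

-- the for-loop of Source B: buf and words accumulators
def pvTokGo : List Char → List Char → List (List Char) → List (List Char)
  | [], buf, words => if buf.isEmpty then words else words ++ [buf]
  | c :: rest, buf, words =>
      if pvSpecialsB.contains c || PySem.Chars.isspace c then
        pvTokGo rest [] (if buf.isEmpty then words else words ++ [buf])
      else pvTokGo rest (buf ++ [c]) words

def prepare_fts_query_py_alt (query : String) : String :=
  String.ofList (PySem.Chars.join " OR ".toList (pvTokGo query.toList [] []))

-- ===== PRECONDITION & SPEC =====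
def Spec_prepare_fts_query_py (query : String) (out : String) : Prop := out = prepare_fts_query_py_alt query
instance (query : String) (out : String) : Decidable (Spec_prepare_fts_query_py query out) := by unfold Spec_prepare_fts_query_py; infer_instance

-- ===== CLAIM (what is proved, stated in full; the proofs are below) =====
def Claim_equal_prepare_fts_query_py : Prop := ∀ (query : String), Dom_prepare_fts_query_py query → Spec_prepare_fts_query_py query (prepare_fts_query_py query)

-- ===== LEMMAS AND PROOFS =====

-- replacing the single character c by ' ' is a pointwise map
theorem pv_replace_go_single (c : Char) :
    ∀ (l : List Char) (fuel : Nat) (acc : List Char), l.length ≤ fuel →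
      PySem.Chars.replace.go [c] [' '] fuel l acc
        = acc.reverse ++ l.map (fun x => if x = c then ' ' else x) := by
  intro l
  induction l with
  | nil =>
    intro fuel acc _
    cases fuel <;> simp [PySem.Chars.replace.go]
  | cons x t ih =>
    intro fuel acc h
    cases fuel with
    | zero => simp at h
    | succ f =>
      simp only [PySem.Chars.replace.go]
      by_cases hx : x = c
      · subst hx
        simp [List.isPrefixOf, ih f _ (by simpa using h)]
      · simp [List.isPrefixOf, hx, Ne.symm hx, ih f _ (by simpa using h)]

theorem pv_replace_single (cs : List Char) (c : Char) :
    PySem.Chars.replace cs [c] [' '] = cs.map (fun x => if x = c then ' ' else x) := by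
  simp [PySem.Chars.replace, pv_replace_go_single c cs cs.length [] le_rfl]

-- A's 16 successive replaces act as one pointwise map
theorem pv_fold_replace (l : List Char) (cs : List Char) :
    l.foldl (fun s c => PySem.Chars.replace s [c] [' ']) cs
      = cs.map (fun x => if x ∈ l then ' ' else x) := by
  induction l generalizing cs with
  | nil => simp
  | cons c l ih =>
    rw [List.foldl_cons, pv_replace_single, ih, List.map_map]
    apply List.map_congr_left
    intro x _
    by_cases hx : x = c <;> simp [Function.comp, hx]

theorem pv_B_eq_A : pvSpecialsB = pvSpecialsA := by decide

theorem pv_delim (x : Char) :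
    PySem.Chars.isspace (if x ∈ pvSpecialsA then ' ' else x)
      = (pvSpecialsB.contains x || PySem.Chars.isspace x) := by
  rw [pv_B_eq_A]
  by_cases hx : x ∈ pvSpecialsA
  · have h3 : PySem.Chars.isspace ' ' = true := by decide
    simp [hx, h3]
  · simp [hx]

theorem pv_nodelim (x : Char) (h : (pvSpecialsB.contains x || PySem.Chars.isspace x) = false) :
    (if x ∈ pvSpecialsA then ' ' else x) = x := by
  rw [pv_B_eq_A] at h
  simp at h
  simp [h.1]

-- split() of A's cleaned string is exactly B's one-pass tokenizer
theorem pv_split_go (cs : List Char) :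
    ∀ (cur : List Char) (acc : List (List Char)),
      PySem.Chars.split₀.go (cs.map (fun x => if x ∈ pvSpecialsA then ' ' else x)) cur acc
        = pvTokGo cs cur.reverse acc.reverse := by
  induction cs with
  | nil =>
    intro cur acc
    by_cases hc : cur.isEmpty <;>
      simp [PySem.Chars.split₀.go, pvTokGo, hc]
  | cons c rest ih =>
    intro cur acc
    simp only [List.map_cons, PySem.Chars.split₀.go, pv_delim c, pvTokGo]
    by_cases hd : (pvSpecialsB.contains c || PySem.Chars.isspace c) = true
    · rw [if_pos hd, if_pos hd]
      by_cases hc : cur.isEmpty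
      · have : cur = [] := by simpa [List.isEmpty_iff] using hc
        subst this
        simp [hc, ih]
      · simp only [hc, if_neg, Bool.false_eq_true, not_false_iff]
        rw [ih]
        simp [show cur ≠ [] from by simpa [List.isEmpty_iff] using hc]
    · rw [if_neg hd, if_neg hd, pv_nodelim c (by simpa using hd)] at *
      rw [ih]
      simp

-- every token B emits is nonempty and whitespace-free
theorem pv_tok_inv (cs : List Char) :
    ∀ (buf : List Char) (words : List (List Char)),
      (∀ x ∈ buf, PySem.Chars.isspace x = false) →
      (∀ w ∈ words, w ≠ [] ∧ ∀ x ∈ w, PySem.Chars.isspace x = false) →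
      ∀ w ∈ pvTokGo cs buf words, w ≠ [] ∧ ∀ x ∈ w, PySem.Chars.isspace x = false := by
  induction cs with
  | nil =>
    intro buf words hb hw w hmem
    simp only [pvTokGo] at hmem
    by_cases hbe : buf.isEmpty
    · rw [if_pos hbe] at hmem; exact hw w hmem
    · rw [if_neg hbe] at hmem
      rcases List.mem_append.mp hmem with h | h
      · exact hw w h
      · simp at h; subst h
        exact ⟨by simpa [List.isEmpty_iff] using hbe, hb⟩
  | cons c rest ih =>
    intro buf words hb hw w hmem
    simp only [pvTokGo] at hmem
    by_cases hd : (pvSpecialsB.contains c || PySem.Chars.isspace c) = true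
    · rw [if_pos hd] at hmem
      refine ih [] _ (by simp) ?_ w hmem
      intro v hv
      by_cases hbe : buf.isEmpty
      · rw [if_pos hbe] at hv; exact hw v hv
      · rw [if_neg hbe] at hv
        rcases List.mem_append.mp hv with h | h
        · exact hw v h
        · simp at h; subst h
          exact ⟨by simpa [List.isEmpty_iff] using hbe, hb⟩
    · rw [if_neg hd] at hmem
      have hcs : PySem.Chars.isspace c = false := (by simpa using hd : _ ∧ _).2
      refine ih (buf ++ [c]) words ?_ hw w hmem
      intro x hx
      rcases List.mem_append.mp hx with h | h
      · exact hb x h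
      · simp at h; subst h; exact hcs

theorem pv_strip_no_space (w : List Char) (h : ∀ x ∈ w, PySem.Chars.isspace x = false) :
    PySem.Chars.strip w = w := by
  have hl : ∀ (l : List Char), (∀ x ∈ l, PySem.Chars.isspace x = false) →
      PySem.Chars.lstrip l = l := by
    intro l hspec
    cases l with
    | nil => rfl
    | cons a t => simp [PySem.Chars.lstrip, hspec a (by simp)]
  simp only [PySem.Chars.strip, PySem.Chars.rstrip, hl w h]
  rw [show List.dropWhile PySem.Chars.isspace w.reverse = w.reverse from ?_, List.reverse_reverse]
  cases hr : w.reverse with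
  | nil => rfl
  | cons a t =>
    have : a ∈ w := by
      have : a ∈ w.reverse := by rw [hr]; simp
      simpa using this
    simp [h a this]

theorem pv_main (query : String) : prepare_fts_query_py query = prepare_fts_query_py_alt query := by
  unfold prepare_fts_query_py prepare_fts_query_py_alt
  dsimp only
  have hclean := pv_fold_replace pvSpecialsA query.toList
  rw [hclean]
  have hsplit : PySem.Chars.split₀ (query.toList.map (fun x => if x ∈ pvSpecialsA then ' ' else x))
      = pvTokGo query.toList [] [] := by
    rw [PySem.Chars.split₀]
    simpa using pv_split_go query.toList [] []
  rw [hsplit]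
  have hinv := pv_tok_inv query.toList [] [] (by simp) (by simp)
  have hfm : ∀ (t : List (List Char)),
      (∀ w ∈ t, w ≠ [] ∧ ∀ x ∈ w, PySem.Chars.isspace x = false) →
      t.filterMap (fun w => if (PySem.Chars.strip w).isEmpty then none
        else some (PySem.Chars.strip w)) = t := by
    intro t ht
    induction t with
    | nil => rfl
    | cons w t ihh =>
      have hw := ht w (by simp)
      rw [List.filterMap_cons, pv_strip_no_space w hw.2]
      have ih2 := ihh (fun v hv => ht v (by simp [hv]))
      simp only [List.isEmpty_iff] at ih2
      simp [hw.1, ih2]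
  rw [hfm _ hinv]
  by_cases he : (pvTokGo query.toList [] []).isEmpty
  · have : pvTokGo query.toList [] [] = [] := by simpa [List.isEmpty_iff] using he
    rw [this]
    simp [PySem.Chars.join]
    rfl
  · simp [he]

-- ===== VERDICT (by name: the statement is the Claim_ definition above) =====
theorem prepare_fts_query_py_spec : Claim_equal_prepare_fts_query_py := by
  intro query _
  unfold Spec_prepare_fts_query_py
  exact pv_main query
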